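-- pv_equiv track=rewrite | github.com/SSSavii/GraphAnalyst | Analyst.py | glyph_combinations_analysis
-- ===== SOURCE A (Python) =====
-- def glyph_combinations_analysis(glyph_data):
--     """
--        Анализирует комбинации графем внутри каждого символа.
--
--        :param glyph_data: Словарь с данными о графемах
--        :return: Отсортированный список словарей с информацией о графемах и их комбинациях
--        """
--     glyph_combinations = {}
--
--     # Собираем информацию о комбинациях графем
--     for unicode, glyphs in glyph_data.items():
--         for i, glyph in enumerate(glyphs):
--             if glyph not in glyph_combinations:
--                 glyph_combinations[glyph] = {}
--             for other_glyph in glyphs[:i] + glyphs[i + 1:]: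
--                 glyph_combinations[glyph][other_glyph] = glyph_combinations[glyph].get(other_glyph, 0) + 1
--
--     # Подготавливаем данные для вывода в Excel
--     data_for_excel = []
--     for glyph, combinations in glyph_combinations.items():
--         sorted_combinations = sorted(combinations.items(), key=lambda x: x[0])
--         combinations_str = ', '.join([f'{g}: {count}' for g, count in sorted_combinations])
--         data_for_excel.append({"Графема": glyph, "Комбинации": combinations_str})
--     return sorted(data_for_excel, key=lambda x: x["Графема"])
-- ===== SOURCE B (Python) =====
-- from collections import Counter
--
--
-- def glyph_combinations_analysis(glyph_data):
--     combos = {}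
--     for glyphs in glyph_data.values():
--         freq = Counter(glyphs)
--         for g in freq:
--             combos.setdefault(g, {})
--         for g, cg in freq.items():
--             for h, ch in freq.items():
--                 n = cg * ch if h != g else cg * (cg - 1)
--                 if n:
--                     combos[g][h] = combos[g].get(h, 0) + n
--     rows = []
--     for g in sorted(combos):
--         s = ', '.join(f'{h}: {n}' for h, n in sorted(combos[g].items(), key=lambda x: x[0]))
--         rows.append({"Графема": g, "Комбинации": s})
--     return rows
-- ===== Notes on version B (the rewrite author's own statement) =====
-- stated objective: alternative
-- what changed: Instead of scanning, for every position, the whole rest of the character's glyph list (slice concatenation) and bumping counts one by one, B builds one Counter per character and adds closed-form products freq[g]*freq[h] (freq[g]*(freq[g]-1) on the diagonal) for the distinct glyphs only, and emits rows by iterating the sorted key set directly instead of building unsorted rows and sorting them.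
import Mathlib
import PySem

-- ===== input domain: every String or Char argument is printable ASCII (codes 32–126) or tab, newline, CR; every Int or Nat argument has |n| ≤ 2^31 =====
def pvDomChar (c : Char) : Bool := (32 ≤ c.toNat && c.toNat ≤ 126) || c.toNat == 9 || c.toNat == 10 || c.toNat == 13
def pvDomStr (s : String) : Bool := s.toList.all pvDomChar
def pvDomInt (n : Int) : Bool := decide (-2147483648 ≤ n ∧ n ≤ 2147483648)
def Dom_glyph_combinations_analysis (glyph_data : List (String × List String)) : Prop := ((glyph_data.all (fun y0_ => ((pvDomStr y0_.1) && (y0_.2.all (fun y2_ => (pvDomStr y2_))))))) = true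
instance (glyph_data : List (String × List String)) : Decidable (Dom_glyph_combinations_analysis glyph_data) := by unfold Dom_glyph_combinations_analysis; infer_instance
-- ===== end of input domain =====

-- B replaces A's per-position scan of slice copies by one Counter per character with closed-form
-- pair products, and emits rows over the sorted key set directly (alternative decomposition).

-- ===== PORT A =====
-- one character: for i, glyph in enumerate(glyphs): ensure entry; for other in glyphs[:i]+glyphs[i+1:]: bump
def glyphCharA (gc : PySem.Dict String (PySem.Dict String Int)) (glyphs : List String) :
    PySem.Dict String (PySem.Dict String Int) :=
  (PySem.List.enumerate glyphs).foldl (fun gc ig =>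
    (PySem.List.slice glyphs none (some ig.1) ++ PySem.List.slice glyphs (some (ig.1 + 1)) none).foldl
      (fun gc other => gc.modify ig.2 PySem.Dict.empty (fun inn => inn.modify other 0 (· + 1)))
      (if gc.contains ig.2 then gc else gc.insert ig.2 PySem.Dict.empty)) gc

def glyph_combinations_analysis (glyph_data : List (String × List String)) : List (List (String × String)) :=
  let gc := (PySem.Dict.ofList glyph_data).items.foldl (fun gc it => glyphCharA gc it.2) PySem.Dict.empty
  let data := gc.items.foldl (fun acc gp =>
    acc ++ [[("Графема", gp.1),
             ("Комбинации", PySem.Str.join ", "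
               ((PySem.List.sorted gp.2.items (fun x => x.1) false).map
                 (fun p => p.1 ++ ": " ++ PySem.Int.toStr p.2)))]]) ([] : List (List (String × String)))
  PySem.List.sorted data (fun x => (PySem.Dict.mk x).getD "Графема" "") false

-- ===== PORT B =====
-- one character: freq = Counter(glyphs); setdefault every glyph; add freq products for distinct pairs
def glyphCharB (combos : PySem.Dict String (PySem.Dict String Int)) (glyphs : List String) :
    PySem.Dict String (PySem.Dict String Int) :=
  let freq := PySem.Dict.counter glyphs
  let combos := freq.keys.foldl (fun c g => c.setdefault g PySem.Dict.empty) combos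
  freq.items.foldl (fun c gp =>
    freq.items.foldl (fun c hp =>
      let n : Int := if hp.1 ≠ gp.1 then gp.2 * hp.2 else gp.2 * (gp.2 - 1)
      if n ≠ 0 then c.modify gp.1 PySem.Dict.empty (fun row => row.modify hp.1 0 (· + n)) else c) c) combos

def glyph_combinations_analysis_alt (glyph_data : List (String × List String)) : List (List (String × String)) :=
  let combos := (PySem.Dict.ofList glyph_data).values.foldl glyphCharB PySem.Dict.empty
  (PySem.List.sorted combos.keys (fun g => g) false).foldl (fun acc g =>
    acc ++ [[("Графема", g),
             ("Комбинации", PySem.Str.join ", "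
               ((PySem.List.sorted (combos.getD g PySem.Dict.empty).items (fun x => x.1) false).map
                 (fun p => p.1 ++ ": " ++ PySem.Int.toStr p.2)))]]) ([] : List (List (String × String)))

-- ===== PRECONDITION & SPEC =====
def Spec_glyph_combinations_analysis (glyph_data : List (String × List String)) (out : List (List (String × String))) : Prop := out = glyph_combinations_analysis_alt glyph_data
instance (glyph_data : List (String × List String)) (out : List (List (String × String))) : Decidable (Spec_glyph_combinations_analysis glyph_data out) := by unfold Spec_glyph_combinations_analysis; infer_instance

-- ===== CLAIM (what is proved, stated in full; the proofs are below) =====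
def Claim_equal_glyph_combinations_analysis : Prop := ∀ (glyph_data : List (String × List String)), Dom_glyph_combinations_analysis glyph_data → Spec_glyph_combinations_analysis glyph_data (glyph_combinations_analysis glyph_data)

-- ===== LEMMAS AND PROOFS =====

def innG (d : PySem.Dict String (PySem.Dict String Int)) (g : String) : PySem.Dict String Int :=
  d.getD g PySem.Dict.empty

theorem innG_modify (d : PySem.Dict String (PySem.Dict String Int)) (g g' : String)
    (f : PySem.Dict String Int → PySem.Dict String Int) :
    innG (d.modify g PySem.Dict.empty f) g' = if g' = g then f (innG d g) else innG d g' := by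
  unfold innG; rw [PySem.Dict.getD_modify]

theorem others_count (L : List String) (k : Nat) (h : String) (hk : k < L.length) :
    ((L.take k ++ L.drop (k+1)).count h : Int) = (L.count h : Int) - (if L[k] = h then 1 else 0) := by
  have h1 : L.count h = (L.take k).count h + ((L[k] :: L.drop (k+1)).count h) := by
    conv_lhs => rw [← List.take_append_drop k L, List.drop_eq_getElem_cons hk]
    rw [List.count_append]
  rw [List.count_append]
  rw [List.count_cons] at h1
  by_cases he : L[k] = h
  · simp only [he, beq_self_eq_true, if_true] at h1 ⊢; omega
  · have : (L[k] == h) = false := by simpa using he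
    simp only [this] at h1
    norm_num at h1
    simp only [he, if_false]
    omega

theorem ensure_innG (d : PySem.Dict String (PySem.Dict String Int)) (g g' : String) :
    innG (if d.contains g then d else d.insert g PySem.Dict.empty) g' = innG d g' := by
  by_cases hc : d.contains g
  · simp [hc]
  · simp only [hc, if_neg, Bool.not_eq_true, innG]
    rw [PySem.Dict.getD_insert]
    split
    · next he => subst he; rw [PySem.Dict.getD_of_not_contains _ _ (by simpa using hc)]
    · rfl

theorem ensure_contains (d : PySem.Dict String (PySem.Dict String Int)) (g g' : String) :
    (if d.contains g then d else d.insert g PySem.Dict.empty).contains g' = (g' == g || d.contains g') := by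
  by_cases hc : d.contains g
  · simp only [hc, if_true]
    by_cases he : g' = g
    · subst he; simp [hc]
    · simp [he]
  · simp [hc, PySem.Dict.contains_insert]

theorem incfold_innG (os : List String) (d : PySem.Dict String (PySem.Dict String Int)) (g g' : String) :
    innG (os.foldl (fun gc other => gc.modify g PySem.Dict.empty (fun inn => inn.modify other 0 (· + 1))) d) g'
      = if g' = g then os.foldl (fun inn other => inn.modify other 0 (· + 1)) (innG d g) else innG d g' := by
  induction os generalizing d with
  | nil => simp only [List.foldl_nil]; split <;> simp_all
  | cons o os ih =>
    simp only [List.foldl_cons, ih, innG_modify]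
    by_cases he : g' = g <;> simp [he]

theorem incfold_contains (os : List String) (d : PySem.Dict String (PySem.Dict String Int)) (g g' : String) :
    (os.foldl (fun gc other => gc.modify g PySem.Dict.empty (fun inn => inn.modify other 0 (· + 1))) d).contains g'
      = (d.contains g' || (g' == g && !os.isEmpty)) := by
  induction os generalizing d with
  | nil => simp
  | cons o os ih =>
    simp only [List.foldl_cons, ih, PySem.Dict.contains_modify]
    cases hgg : (g' == g) <;> cases hdc : d.contains g' <;> simp_all

def PosI (inn : PySem.Dict String Int) : Prop :=
  ∀ h, inn.contains h = true ↔ 0 < inn.getD h 0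

theorem posI_getD_nonneg (inn : PySem.Dict String Int) (hp : PosI inn) (h : String) :
    0 ≤ inn.getD h 0 := by
  cases hc : inn.contains h
  · rw [PySem.Dict.getD_of_not_contains _ _ hc]
  · exact le_of_lt ((hp h).1 hc)

theorem posI_modify (inn : PySem.Dict String Int) (o : String) (n : Int) (hn : 0 < n)
    (hp : PosI inn) : PosI (inn.modify o 0 (· + n)) := by
  intro h
  rw [PySem.Dict.contains_modify, PySem.Dict.getD_modify]
  by_cases he : h = o
  · subst he
    have := posI_getD_nonneg inn hp h
    simp only [if_true, beq_self_eq_true, Bool.true_or, true_iff]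
    omega
  · have : (h == o) = false := by simpa using he
    simp only [this, he, if_false, Bool.false_or]
    exact hp h

theorem nodupI_modify (inn : PySem.Dict String Int) (o : String) (n : Int)
    (hn : inn.keys.Nodup) : (inn.modify o 0 (· + n)).keys.Nodup := by
  rw [PySem.Dict.keys_modify]
  exact PySem.Dict.nodup_keys_insert _ _ _ hn

theorem posI_incfold (os : List String) (inn : PySem.Dict String Int) (hp : PosI inn) :
    PosI (os.foldl (fun inn other => inn.modify other 0 (· + 1)) inn) := by
  induction os generalizing inn with
  | nil => exact hp
  | cons o os ih => exact ih _ (posI_modify _ _ _ one_pos hp)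

theorem nodupI_incfold (os : List String) (inn : PySem.Dict String Int) (hn : inn.keys.Nodup) :
    (os.foldl (fun inn other => inn.modify other 0 (· + 1)) inn).keys.Nodup := by
  induction os generalizing inn with
  | nil => exact hn
  | cons o os ih => exact ih _ (nodupI_modify _ _ _ hn)

def InvD (d : PySem.Dict String (PySem.Dict String Int)) : Prop :=
  d.keys.Nodup ∧ (∀ g, (innG d g).keys.Nodup) ∧ (∀ g, PosI (innG d g))

-- A: effect of one position (index k, glyph L[k]) on inner counts
def bodyA (L : List String) (gc : PySem.Dict String (PySem.Dict String Int)) (ig : Int × String) :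
    PySem.Dict String (PySem.Dict String Int) :=
  (PySem.List.slice L none (some ig.1) ++ PySem.List.slice L (some (ig.1 + 1)) none).foldl
    (fun gc other => gc.modify ig.2 PySem.Dict.empty (fun inn => inn.modify other 0 (· + 1)))
    (if gc.contains ig.2 then gc else gc.insert ig.2 PySem.Dict.empty)

theorem bodyA_others (L : List String) (k : Nat) :
    PySem.List.slice L none (some ((k : Nat) : Int)) ++ PySem.List.slice L (some (((k : Nat) : Int) + 1)) none
      = L.take k ++ L.drop (k+1) := by
  rw [PySem.List.slice_to_natCast]
  have : ((k : Nat) : Int) + 1 = (((k+1 : Nat)) : Int) := by push_cast; ring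
  rw [this, PySem.List.slice_from_natCast]

theorem bodyA_innG_getD (L : List String) (d : PySem.Dict String (PySem.Dict String Int))
    (k : Nat) (hk : k < L.length) (g' h : String) :
    (innG (bodyA L d ((k : Int), L[k])) g').getD h 0
      = (innG d g').getD h 0
        + (if g' = L[k] then (L.count h : Int) - (if L[k] = h then 1 else 0) else 0) := by
  unfold bodyA
  simp only [bodyA_others L k]
  rw [incfold_innG]
  by_cases he : g' = L[k]
  · simp only [he, if_true]
    rw [PySem.Dict.getD_foldl_modify_add_one, ensure_innG, others_count L k h hk]
  · simp only [he, if_false]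
    rw [ensure_innG]
    ring

theorem bodyA_contains (L : List String) (d : PySem.Dict String (PySem.Dict String Int))
    (k : Nat) (hk : k < L.length) (g' : String) :
    (bodyA L d ((k : Int), L[k])).contains g' = (d.contains g' || (g' == L[k])) := by
  unfold bodyA
  rw [incfold_contains, ensure_contains]
  cases hgg : (g' == L[k]) <;> cases hdc : d.contains g' <;> simp_all

theorem bodyA_inv (L : List String) (d : PySem.Dict String (PySem.Dict String Int))
    (k : Nat) (hk : k < L.length) (hI : InvD d) : InvD (bodyA L d ((k : Int), L[k])) := by
  obtain ⟨h1, h2, h3⟩ := hI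
  have hensN : (if d.contains L[k] then d else d.insert L[k] PySem.Dict.empty).keys.Nodup := by
    split
    · exact h1
    · exact PySem.Dict.nodup_keys_insert _ _ _ h1
  refine ⟨?_, ?_, ?_⟩
  · unfold bodyA
    exact PySem.Dict.nodup_keys_foldl_modify_key _ (fun _ => L[k]) _
      (fun _ other => fun inn => inn.modify other 0 (· + 1)) _ hensN
  · intro g
    unfold bodyA
    simp only [bodyA_others L k]
    rw [incfold_innG]
    split
    · rw [ensure_innG]; exact nodupI_incfold _ _ (h2 _)
    · rw [ensure_innG]; exact h2 _
  · intro g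
    unfold bodyA
    simp only [bodyA_others L k]
    rw [incfold_innG]
    split
    · rw [ensure_innG]; exact posI_incfold _ _ (h3 _)
    · rw [ensure_innG]; exact h3 _

def pcL (L : List String) (g h : String) : Int :=
  if g = h then (L.count g : Int) * ((L.count g : Int) - 1) else (L.count g : Int) * (L.count h : Int)

theorem foldA_getD (L : List String) (ps : List (Int × String))
    (hps : ∀ p ∈ ps, ∃ k, ∃ _ : k < L.length, p = ((k : Int), L[k]))
    (d : PySem.Dict String (PySem.Dict String Int)) (g h : String) :
    (innG (ps.foldl (bodyA L) d) g).getD h 0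
      = (innG d g).getD h 0
        + (ps.countP (fun p => p.2 == g) : Int) * ((L.count h : Int) - (if g = h then 1 else 0)) := by
  induction ps generalizing d with
  | nil => simp
  | cons p ps ih =>
    obtain ⟨k, hk, rfl⟩ := hps p (by simp)
    simp only [List.foldl_cons]
    rw [ih (fun q hq => hps q (by simp [hq])) _]
    rw [bodyA_innG_getD L d k hk g h]
    rw [List.countP_cons]
    by_cases he : g = L[k]
    · have hb : ((((k : Int), L[k]) : Int × String).2 == g) = true := by simp [he]
      simp only [if_true, ← he, beq_self_eq_true]
      push_cast
      ring
    · have hb : ((((k : Int), L[k]) : Int × String).2 == g) = false := by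
        simp; exact fun hx => he hx.symm
      have : ¬ (g = L[k]) := he
      simp only [hb, this, if_false, add_zero]
      push_cast
      ring

theorem foldA_contains (L : List String) (ps : List (Int × String))
    (hps : ∀ p ∈ ps, ∃ k, ∃ _ : k < L.length, p = ((k : Int), L[k]))
    (d : PySem.Dict String (PySem.Dict String Int)) (g : String) :
    (ps.foldl (bodyA L) d).contains g = (d.contains g || decide (g ∈ ps.map Prod.snd)) := by
  induction ps generalizing d with
  | nil => simp
  | cons p ps ih =>
    obtain ⟨k, hk, rfl⟩ := hps p (by simp)
    simp only [List.foldl_cons]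
    rw [ih (fun q hq => hps q (by simp [hq])) _]
    rw [bodyA_contains L d k hk g]
    simp only [List.map_cons, List.mem_cons]
    by_cases he : g = L[k] <;> cases hdc : d.contains g <;> simp_all

theorem foldA_inv (L : List String) (ps : List (Int × String))
    (hps : ∀ p ∈ ps, ∃ k, ∃ _ : k < L.length, p = ((k : Int), L[k]))
    (d : PySem.Dict String (PySem.Dict String Int)) (hI : InvD d) :
    InvD (ps.foldl (bodyA L) d) := by
  induction ps generalizing d with
  | nil => exact hI
  | cons p ps ih =>
    obtain ⟨k, hk, rfl⟩ := hps p (by simp)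
    exact ih (fun q hq => hps q (by simp [hq])) _ (bodyA_inv L d k hk hI)

theorem enum_hps (L : List String) :
    ∀ p ∈ PySem.List.enumerate L, ∃ k, ∃ _ : k < L.length, p = ((k : Int), L[k]) := by
  intro p hp
  rw [PySem.List.mem_enumerate_iff] at hp
  obtain ⟨k, hk, rfl⟩ := hp
  exact ⟨k, hk, by simp⟩

theorem enum_countP (L : List String) (g : String) :
    (PySem.List.enumerate L).countP (fun p => p.2 == g) = L.count g := by
  have h1 := List.countP_map (p := fun x => x == g) (f := fun p : Int × String => p.2)
    (l := PySem.List.enumerate L 0)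
  rw [PySem.List.map_snd_enumerate] at h1
  rw [List.count, h1]
  rfl

theorem enum_mem_snd (L : List String) (g : String) :
    (g ∈ (PySem.List.enumerate L).map Prod.snd) ↔ g ∈ L := by
  have h := PySem.List.map_snd_enumerate L 0
  rw [show (Prod.snd : Int × String → String) = fun x => x.2 from rfl, h]

def glyphCharA' (gc : PySem.Dict String (PySem.Dict String Int)) (L : List String) :
    PySem.Dict String (PySem.Dict String Int) :=
  (PySem.List.enumerate L).foldl (bodyA L) gc

theorem charA_getD (d : PySem.Dict String (PySem.Dict String Int)) (L : List String) (g h : String) :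
    (innG (glyphCharA' d L) g).getD h 0 = (innG d g).getD h 0 + pcL L g h := by
  unfold glyphCharA'
  rw [foldA_getD L _ (enum_hps L) d g h, enum_countP]
  unfold pcL
  by_cases he : g = h
  · simp [he]
  · simp [he]

theorem charA_contains (d : PySem.Dict String (PySem.Dict String Int)) (L : List String) (g : String) :
    (glyphCharA' d L).contains g = (d.contains g || decide (g ∈ L)) := by
  unfold glyphCharA'
  rw [foldA_contains L _ (enum_hps L) d g]
  congr 1
  simp only [decide_eq_decide]
  exact enum_mem_snd L g

theorem charA_inv (d : PySem.Dict String (PySem.Dict String Int)) (L : List String) (hI : InvD d) :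
    InvD (glyphCharA' d L) := foldA_inv L _ (enum_hps L) d hI

-- ===== B side =====
theorem setdefault_innG (c : PySem.Dict String (PySem.Dict String Int)) (g g' : String) :
    innG (c.setdefault g PySem.Dict.empty) g' = innG c g' := by
  by_cases he : g' = g
  · subst he; exact PySem.Dict.getD_setdefault_self c g' _ _
  · unfold innG
    rw [PySem.Dict.getD_eq_get?_getD, PySem.Dict.get?_setdefault_of_ne _ _ he,
      ← PySem.Dict.getD_eq_get?_getD]

theorem sdfold_innG (ks : List String) (c : PySem.Dict String (PySem.Dict String Int)) (g' : String) :
    innG (ks.foldl (fun c g => c.setdefault g PySem.Dict.empty) c) g' = innG c g' := by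
  induction ks generalizing c with
  | nil => rfl
  | cons x ks ih => rw [List.foldl_cons, ih, setdefault_innG]

theorem sdfold_contains (ks : List String) (c : PySem.Dict String (PySem.Dict String Int)) (g' : String) :
    (ks.foldl (fun c g => c.setdefault g PySem.Dict.empty) c).contains g'
      = (c.contains g' || decide (g' ∈ ks)) := by
  induction ks generalizing c with
  | nil => simp
  | cons x ks ih =>
    rw [List.foldl_cons, ih, PySem.Dict.contains_setdefault]
    by_cases he : g' = x <;> cases hdc : c.contains g' <;> simp_all

theorem sdfold_nodup (ks : List String) (c : PySem.Dict String (PySem.Dict String Int))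
    (hn : c.keys.Nodup) : (ks.foldl (fun c g => c.setdefault g PySem.Dict.empty) c).keys.Nodup := by
  induction ks generalizing c with
  | nil => exact hn
  | cons x ks ih =>
    refine ih _ ?_
    show (c.setdefault x PySem.Dict.empty).keys.Nodup
    by_cases hc : c.contains x
    · rw [PySem.Dict.setdefault_of_contains _ _ hc]; exact hn
    · rw [PySem.Dict.setdefault_of_not_contains _ _ (by simpa using hc)]
      exact PySem.Dict.nodup_keys_insert _ _ _ hn

theorem sdfold_inv (ks : List String) (c : PySem.Dict String (PySem.Dict String Int)) (hI : InvD c) :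
    InvD (ks.foldl (fun c g => c.setdefault g PySem.Dict.empty) c) := by
  obtain ⟨h1, h2, h3⟩ := hI
  refine ⟨sdfold_nodup ks c h1, ?_, ?_⟩ <;> intro g <;> rw [sdfold_innG]
  · exact h2 g
  · exact h3 g

def bodyQ (g : String) (cg : Int) (c : PySem.Dict String (PySem.Dict String Int)) (hp : String × Int) :
    PySem.Dict String (PySem.Dict String Int) :=
  let n : Int := if hp.1 ≠ g then cg * hp.2 else cg * (cg - 1)
  if n ≠ 0 then c.modify g PySem.Dict.empty (fun row => row.modify hp.1 0 (· + n)) else c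

def nval (g : String) (cg : Int) (hp : String × Int) : Int :=
  if hp.1 ≠ g then cg * hp.2 else cg * (cg - 1)

theorem foldQ_getD (Q : List (String × Int)) (c : PySem.Dict String (PySem.Dict String Int))
    (g : String) (cg : Int) (g' h : String) :
    (innG (Q.foldl (bodyQ g cg) c) g').getD h 0
      = (innG c g').getD h 0
        + (if g' = g then ((Q.filter (fun hp => hp.1 == h)).map (nval g cg)).sum else 0) := by
  induction Q generalizing c with
  | nil => simp
  | cons hp Q ih =>
    rw [List.foldl_cons, ih]
    have hstep : (innG (bodyQ g cg c hp) g').getD h 0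
        = (innG c g').getD h 0 + (if g' = g ∧ hp.1 = h then nval g cg hp else 0) := by
      have hb : bodyQ g cg c hp
          = if nval g cg hp ≠ 0 then
              c.modify g PySem.Dict.empty (fun row => row.modify hp.1 0 (· + nval g cg hp))
            else c := rfl
      rw [hb]
      by_cases hz : nval g cg hp ≠ 0
      · rw [if_pos hz, innG_modify]
        by_cases he : g' = g
        · simp only [he, if_true, true_and]
          rw [PySem.Dict.getD_modify]
          by_cases hh : h = hp.1
          · simp [hh]
          · have h2 : ¬ (hp.1 = h) := fun x => hh x.symm
            simp [hh, h2]
        · simp [he]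
      · rw [if_neg hz]
        have hz' : nval g cg hp = 0 := by by_contra hx; exact hz hx
        by_cases he : g' = g ∧ hp.1 = h <;> simp [he, hz']
    rw [hstep]
    rw [List.filter_cons]
    by_cases hh : hp.1 = h
    · have hb : (hp.1 == h) = true := by simpa using hh
      simp only [hb, if_true, List.map_cons, List.sum_cons]
      by_cases he : g' = g
      · simp only [he, hh, if_true, and_true]; ring
      · simp [he]
    · have hb : (hp.1 == h) = false := by simpa using hh
      simp only [hb, Bool.false_eq_true, if_false]
      by_cases he : g' = g <;> simp [he, hh]

theorem foldQ_contains (Q : List (String × Int)) (c : PySem.Dict String (PySem.Dict String Int))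
    (g : String) (cg : Int) (hc : c.contains g = true) (g' : String) :
    (Q.foldl (bodyQ g cg) c).contains g' = c.contains g' := by
  induction Q generalizing c with
  | nil => rfl
  | cons hp Q ih =>
    rw [List.foldl_cons]
    have hstep : ∀ g'', (bodyQ g cg c hp).contains g'' = c.contains g'' := by
      intro g''
      have hb : bodyQ g cg c hp
          = if nval g cg hp ≠ 0 then
              c.modify g PySem.Dict.empty (fun row => row.modify hp.1 0 (· + nval g cg hp))
            else c := rfl
      rw [hb]
      split
      · rw [PySem.Dict.contains_modify]
        by_cases he : g'' = g
        · subst he; simp [hc]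
        · simp [he]
      · rfl
    rw [ih _ (by rw [hstep g]; exact hc), hstep g']

theorem foldQ_inv (Q : List (String × Int)) (c : PySem.Dict String (PySem.Dict String Int))
    (g : String) (cg : Int) (hpos : ∀ hp ∈ Q, 0 < nval g cg hp ∨ nval g cg hp = 0)
    (hI : InvD c) : InvD (Q.foldl (bodyQ g cg) c) := by
  induction Q generalizing c with
  | nil => exact hI
  | cons hp Q ih =>
    refine ih _ (fun q hq => hpos q (by simp [hq])) ?_
    have hb : bodyQ g cg c hp
        = if nval g cg hp ≠ 0 then
            c.modify g PySem.Dict.empty (fun row => row.modify hp.1 0 (· + nval g cg hp))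
          else c := rfl
    rw [hb]
    split
    · next hz =>
      obtain ⟨h1, h2, h3⟩ := hI
      have hn : 0 < nval g cg hp := by
        rcases hpos hp (by simp) with h | h
        · exact h
        · exact absurd h hz
      refine ⟨?_, ?_, ?_⟩
      · rw [PySem.Dict.keys_modify]; exact PySem.Dict.nodup_keys_insert _ _ _ h1
      · intro g'
        rw [innG_modify]
        split
        · exact nodupI_modify _ _ _ (h2 g)
        · exact h2 g'
      · intro g'
        rw [innG_modify]
        split
        · exact posI_modify _ _ _ hn (h3 g)
        · exact h3 g'
    · exact hI

theorem foldP_getD (P Q : List (String × Int)) (c : PySem.Dict String (PySem.Dict String Int))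
    (g' h : String) :
    (innG (P.foldl (fun c gp => Q.foldl (bodyQ gp.1 gp.2) c) c) g').getD h 0
      = (innG c g').getD h 0
        + ((P.filter (fun gp => gp.1 == g')).map
            (fun gp => ((Q.filter (fun hp => hp.1 == h)).map (nval gp.1 gp.2)).sum)).sum := by
  induction P generalizing c with
  | nil => simp
  | cons gp P ih =>
    rw [List.foldl_cons, ih, foldQ_getD, List.filter_cons]
    by_cases he : gp.1 = g'
    · have hb : (gp.1 == g') = true := by simpa using he
      have he2 : g' = gp.1 := he.symm
      simp only [if_true, List.map_cons, List.sum_cons, he2, beq_self_eq_true]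
      ring
    · have hb : (gp.1 == g') = false := by simpa using he
      have he2 : ¬ (g' = gp.1) := fun x => he x.symm
      simp only [hb, Bool.false_eq_true, if_false, he2]
      ring_nf

theorem filt_set (l : List String) (hnd : l.Nodup) (a : String) :
    l.filter (fun k => k == a) = if a ∈ l then [a] else [] := by
  have hp : (fun k : String => k == a) = fun x => decide (x = a) := by
    funext x; by_cases hx : x = a <;> simp [hx]
  rw [hp, List.filter_eq]
  by_cases hm : a ∈ l
  · rw [List.count_eq_one_of_mem hnd hm, if_pos hm]; rfl
  · rw [List.count_eq_zero_of_not_mem hm, if_neg hm]; rfl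

def glyphCharB' (c : PySem.Dict String (PySem.Dict String Int)) (L : List String) :
    PySem.Dict String (PySem.Dict String Int) :=
  (PySem.Dict.counter L).items.foldl (fun c gp => (PySem.Dict.counter L).items.foldl (bodyQ gp.1 gp.2) c)
    ((PySem.Dict.counter L).keys.foldl (fun c g => c.setdefault g PySem.Dict.empty) c)

theorem counter_filter (L : List String) (a : String) :
    (PySem.Dict.counter L).items.filter (fun p => p.1 == a)
      = if a ∈ L then [(a, (L.count a : Int))] else [] := by
  rw [PySem.Dict.items_counter, List.filter_map]
  have hc : ((fun p : String × Int => p.1 == a) ∘ fun k => (k, (L.count k : Int)))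
      = fun k => k == a := rfl
  rw [hc, filt_set _ (PySem.Set.nodup_ofList L) a]
  by_cases hm : a ∈ L
  · simp [hm, (PySem.Set.mem_ofList L a).2 hm]
  · have : ¬ a ∈ PySem.Set.ofList L := fun hx => hm ((PySem.Set.mem_ofList L a).1 hx)
    simp [hm, this]

theorem charB_getD (c : PySem.Dict String (PySem.Dict String Int)) (L : List String) (g h : String) :
    (innG (glyphCharB' c L) g).getD h 0 = (innG c g).getD h 0 + pcL L g h := by
  unfold glyphCharB'
  rw [foldP_getD, sdfold_innG]
  congr 1
  rw [counter_filter, counter_filter]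
  by_cases hh : h ∈ L
  · rw [if_pos hh]
    by_cases hg : g ∈ L
    · rw [if_pos hg]
      simp only [List.map_cons, List.map_nil, List.sum_cons, List.sum_nil, add_zero]
      unfold nval pcL
      by_cases he : g = h
      · subst he; simp
      · have he2 : h ≠ g := fun x => he x.symm
        simp [he, he2]
    · rw [if_neg hg]
      simp only [List.map_nil, List.sum_nil]
      unfold pcL
      have hz : L.count g = 0 := List.count_eq_zero_of_not_mem hg
      by_cases he : g = h
      · subst he; simp [hz]
      · simp [he, hz]
  · rw [if_neg hh]
    by_cases hg : g ∈ L
    · rw [if_pos hg]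
      simp only [List.map_cons, List.map_nil, List.sum_cons, List.sum_nil, add_zero, List.map_nil, List.sum_nil]
      unfold pcL
      have hz : L.count h = 0 := List.count_eq_zero_of_not_mem hh
      by_cases he : g = h
      · subst he; exact absurd hg hh
      · simp [he, hz]
    · rw [if_neg hg]
      simp only [List.map_nil, List.sum_nil]
      unfold pcL
      have hz : L.count g = 0 := List.count_eq_zero_of_not_mem hg
      by_cases he : g = h
      · subst he; simp [hz]
      · simp [he, hz]

theorem charB_contains (c : PySem.Dict String (PySem.Dict String Int)) (L : List String) (g : String) :
    (glyphCharB' c L).contains g = (c.contains g || decide (g ∈ L)) := by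
  unfold glyphCharB'
  have hsd : ∀ g', ((PySem.Dict.counter L).keys.foldl (fun c g => c.setdefault g PySem.Dict.empty) c).contains g'
      = (c.contains g' || decide (g' ∈ L)) := by
    intro g'
    rw [sdfold_contains, PySem.Dict.keys_counter]
    by_cases hm : g' ∈ L
    · simp [hm, (PySem.Set.mem_ofList L g').2 hm]
    · have : ¬ g' ∈ PySem.Set.ofList L := fun hx => hm ((PySem.Set.mem_ofList L g').1 hx)
      simp [hm, this]
  have hfold : ∀ (P : List (String × Int)) c',
      (∀ gp ∈ P, c'.contains gp.1 = true) →
      ∀ g', (P.foldl (fun c gp => (PySem.Dict.counter L).items.foldl (bodyQ gp.1 gp.2) c) c').contains g'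
        = c'.contains g' := by
    intro P
    induction P with
    | nil => intro c' _ g'; rfl
    | cons gp P ih =>
      intro c' hall g'
      rw [List.foldl_cons]
      have h1 : ∀ g'', ((PySem.Dict.counter L).items.foldl (bodyQ gp.1 gp.2) c').contains g''
          = c'.contains g'' := foldQ_contains _ _ _ _ (hall gp (by simp))
      rw [ih _ (fun q hq => by rw [h1]; exact hall q (by simp [hq])) g', h1]
  rw [hfold _ _ ?hall g, hsd]
  case hall =>
    intro gp hgp
    rw [hsd]
    rw [PySem.Dict.items_counter] at hgp
    simp only [List.mem_map] at hgp
    obtain ⟨k, hk, rfl⟩ := hgp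
    have : k ∈ L := (PySem.Set.mem_ofList L k).1 hk
    simp [this]

theorem charB_inv (c : PySem.Dict String (PySem.Dict String Int)) (L : List String) (hI : InvD c) :
    InvD (glyphCharB' c L) := by
  unfold glyphCharB'
  have hQpos : ∀ gp ∈ (PySem.Dict.counter L).items, ∀ hp ∈ (PySem.Dict.counter L).items,
      0 < nval gp.1 gp.2 hp ∨ nval gp.1 gp.2 hp = 0 := by
    intro gp hgp hp hhp
    rw [PySem.Dict.items_counter] at hgp hhp
    simp only [List.mem_map] at hgp hhp
    obtain ⟨k, hk, rfl⟩ := hgp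
    obtain ⟨j, hj, rfl⟩ := hhp
    have hk1 : 1 ≤ L.count k := List.count_pos_iff.2 ((PySem.Set.mem_ofList L k).1 hk)
    have hj1 : 1 ≤ L.count j := List.count_pos_iff.2 ((PySem.Set.mem_ofList L j).1 hj)
    unfold nval
    by_cases he : j = k
    · subst he
      simp only [ne_eq, not_true_eq_false, if_false]
      by_cases h2 : 2 ≤ L.count j
      · left
        have ha : (0:Int) < (L.count j : Int) := by exact_mod_cast hk1
        have hb : (0:Int) < (L.count j : Int) - 1 := by
          have : (2:Int) ≤ (L.count j : Int) := by exact_mod_cast h2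
          omega
        exact mul_pos ha hb
      · right
        have : L.count j = 1 := by omega
        rw [this]
        norm_num
    · simp only [ne_eq, he, not_false_iff, if_true]
      left
      have ha : (0:Int) < (L.count k : Int) := by exact_mod_cast hk1
      have hb : (0:Int) < (L.count j : Int) := by exact_mod_cast hj1
      exact mul_pos ha hb
  have hsd : InvD ((PySem.Dict.counter L).keys.foldl (fun c g => c.setdefault g PySem.Dict.empty) c) :=
    sdfold_inv _ _ hI
  revert hsd
  generalize ((PySem.Dict.counter L).keys.foldl (fun c g => c.setdefault g PySem.Dict.empty) c) = c0
  have hmain : ∀ (P : List (String × Int)), (∀ gp ∈ P, gp ∈ (PySem.Dict.counter L).items) →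
      ∀ c0, InvD c0 →
      InvD (P.foldl (fun c gp => (PySem.Dict.counter L).items.foldl (bodyQ gp.1 gp.2) c) c0) := by
    intro P
    induction P with
    | nil => intro _ c0 h0; exact h0
    | cons gp P ih =>
      intro hmem c0 h0
      rw [List.foldl_cons]
      exact ih (fun q hq => hmem q (by simp [hq])) _
        (foldQ_inv _ _ _ _ (fun hp hhp => hQpos gp (hmem gp (by simp)) hp hhp) h0)
  exact fun hsd => hmain _ (fun gp hgp => hgp) c0 hsd

-- ===== joint state =====
def StateOK (d d' : PySem.Dict String (PySem.Dict String Int)) : Prop :=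
  InvD d ∧ InvD d' ∧ (∀ g, d.contains g = d'.contains g) ∧
    (∀ g h, (innG d g).getD h 0 = (innG d' g).getD h 0)

theorem state_step (L : List String) (d d' : PySem.Dict String (PySem.Dict String Int))
    (h : StateOK d d') : StateOK (glyphCharA' d L) (glyphCharB' d' L) := by
  obtain ⟨h1, h2, h3, h4⟩ := h
  refine ⟨charA_inv d L h1, charB_inv d' L h2, ?_, ?_⟩
  · intro g; rw [charA_contains, charB_contains, h3]
  · intro g h; rw [charA_getD, charB_getD, h4]

theorem state_empty : StateOK PySem.Dict.empty PySem.Dict.empty := by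
  have hinn : ∀ g, innG (PySem.Dict.empty : PySem.Dict String (PySem.Dict String Int)) g
      = PySem.Dict.empty := by
    intro g; unfold innG; rw [PySem.Dict.getD_of_not_contains _ _ (PySem.Dict.contains_empty g)]
  refine ⟨⟨?_, ?_, ?_⟩, ⟨?_, ?_, ?_⟩, fun g => rfl, fun g h => rfl⟩ <;>
    first
      | exact PySem.Dict.nodup_keys_empty
      | (intro g; rw [hinn g]; exact PySem.Dict.nodup_keys_empty)
      | (intro g; rw [hinn g]; intro h;
         rw [PySem.Dict.getD_of_not_contains _ _ (PySem.Dict.contains_empty h)]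
         simp [PySem.Dict.contains_empty])

theorem state_fold (its : List (String × List String)) :
    StateOK (its.foldl (fun gc it => glyphCharA' gc it.2) PySem.Dict.empty)
            (its.foldl (fun c it => glyphCharB' c it.2) PySem.Dict.empty) := by
  have hgen : ∀ (l : List (String × List String)) d d', StateOK d d' →
      StateOK (l.foldl (fun gc it => glyphCharA' gc it.2) d) (l.foldl (fun c it => glyphCharB' c it.2) d') := by
    intro l
    induction l with
    | nil => intro d d' h; exact h
    | cons x l ih => intro d d' h; exact ih _ _ (state_step x.2 d d' h)
  exact hgen its _ _ state_empty

-- ===== formatting =====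
theorem get?_ext_of (a b : PySem.Dict String Int) (h : String)
    (hc : a.contains h = b.contains h) (hd : a.getD h 0 = b.getD h 0) :
    a.get? h = b.get? h := by
  have ha := PySem.Dict.contains_eq_isSome_get? a h
  have hb := PySem.Dict.contains_eq_isSome_get? b h
  have hda := PySem.Dict.getD_eq_get?_getD a h 0
  have hdb := PySem.Dict.getD_eq_get?_getD b h 0
  cases hga : a.get? h <;> cases hgb : b.get? h <;> rw [hga] at ha hda <;> rw [hgb] at hb hdb <;>
      rw [ha, hb] at hc
  all_goals first
    | rfl
    | (rw [hda, hdb] at hd; simp only [Option.getD_some] at hd; exact congrArg some hd)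
    | (exfalso; simp at hc)

theorem pairwise_lt_of_le_nodup {α : Type} (key : α → String) (l : List α)
    (hle : l.Pairwise (fun a b => key a ≤ key b)) (hnd : (l.map key).Nodup) :
    l.Pairwise (fun a b => key a < key b) := by
  rw [List.Nodup, List.pairwise_map] at hnd
  exact (hle.and hnd).imp (fun h => lt_of_le_of_ne h.1 h.2)

theorem items_nodup (a : PySem.Dict String Int) (hn : a.keys.Nodup) : a.items.Nodup := by
  have : a.keys = a.items.map Prod.fst := rfl
  rw [this] at hn
  exact hn.of_map

theorem sortedItems_ext (a b : PySem.Dict String Int) (hna : a.keys.Nodup) (hnb : b.keys.Nodup)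
    (hg : ∀ h, a.get? h = b.get? h) :
    PySem.List.sorted a.items (fun x => x.1) false = PySem.List.sorted b.items (fun x => x.1) false := by
  have hperm : (PySem.List.sorted b.items (fun x => x.1) false).Perm a.items := by
    refine (PySem.List.sorted_perm b.items _ false).trans ?_
    rw [List.perm_ext_iff_of_nodup (items_nodup b hnb) (items_nodup a hna)]
    rintro ⟨k, v⟩
    rw [← PySem.Dict.get?_eq_some_iff_mem_items b k v hnb, ← PySem.Dict.get?_eq_some_iff_mem_items a k v hna, hg k]
  refine PySem.List.sorted_eq_of_perm_of_pairwise_lt a.items _ (fun x => x.1) hperm ?_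
  refine pairwise_lt_of_le_nodup _ _ (PySem.List.sorted_pairwise b.items (fun x => x.1)) ?_
  have hp : ((PySem.List.sorted b.items (fun x => x.1) false).map (fun x : String × Int => x.1)).Perm
      (b.items.map (fun x : String × Int => x.1)) :=
    (PySem.List.sorted_perm b.items _ false).map _
  rw [hp.nodup_iff]
  exact hnb

def fmtRow (inn : PySem.Dict String Int) : String :=
  PySem.Str.join ", " ((PySem.List.sorted inn.items (fun x => x.1) false).map
    (fun p => p.1 ++ ": " ++ PySem.Int.toStr p.2))

def keyRow (x : List (String × String)) : String := (PySem.Dict.mk x).getD "Графема" ""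

theorem rowkey (g s : String) : keyRow [("Графема", g), ("Комбинации", s)] = g := by
  unfold keyRow
  rw [PySem.Dict.getD_eq_get?_getD, PySem.Dict.get?_mk_cons]
  simp

theorem inner_get?_eq (dA dB : PySem.Dict String (PySem.Dict String Int)) (hS : StateOK dA dB)
    (g h : String) : (innG dA g).get? h = (innG dB g).get? h := by
  obtain ⟨⟨_, _, hpa⟩, ⟨_, _, hpb⟩, _, h4⟩ := hS
  refine get?_ext_of _ _ h ?_ (h4 g h)
  have pa := hpa g h
  have pb := hpb g h
  rw [h4 g h] at pa
  cases ca : (innG dA g).contains h <;> cases cb : (innG dB g).contains h <;>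
    rw [ca] at pa <;> rw [cb] at pb
  all_goals first
    | rfl
    | exact pa.2 (pb.1 rfl)
    | exact pb.2 (pa.1 rfl)
    | exact (pa.2 (pb.1 rfl)).symm
    | exact (pb.2 (pa.1 rfl)).symm

theorem fmtRow_eq (dA dB : PySem.Dict String (PySem.Dict String Int)) (hS : StateOK dA dB)
    (g : String) : fmtRow (innG dA g) = fmtRow (innG dB g) := by
  unfold fmtRow
  rw [sortedItems_ext (innG dA g) (innG dB g) (hS.1.2.1 g) (hS.2.1.2.1 g) (inner_get?_eq dA dB hS g)]

theorem keys_perm (dA dB : PySem.Dict String (PySem.Dict String Int)) (hS : StateOK dA dB) :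
    dB.keys.Perm dA.keys := by
  rw [List.perm_ext_iff_of_nodup hS.2.1.1 hS.1.1]
  intro a
  rw [← PySem.Dict.contains_iff_mem_keys, ← PySem.Dict.contains_iff_mem_keys, hS.2.2.1 a]

theorem format_eq (dA dB : PySem.Dict String (PySem.Dict String Int)) (hS : StateOK dA dB) :
    PySem.List.sorted
      (dA.items.foldl (fun acc gp => acc ++ [[("Графема", gp.1), ("Комбинации", fmtRow gp.2)]])
        ([] : List (List (String × String))))
      keyRow false
    = (PySem.List.sorted dB.keys (fun g => g) false).foldl
        (fun acc g => acc ++ [[("Графема", g), ("Комбинации", fmtRow (innG dB g))]])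
        ([] : List (List (String × String))) := by
  rw [PySem.List.foldl_append_singleton_eq_map
    (f := fun gp : String × PySem.Dict String Int => [("Графема", gp.1), ("Комбинации", fmtRow gp.2)]),
    PySem.List.foldl_append_singleton_eq_map
    (f := fun g : String => [("Графема", g), ("Комбинации", fmtRow (innG dB g))])]
  simp only [List.nil_append]
  rw [PySem.Dict.items_eq_map_keys dA hS.1.1 PySem.Dict.empty, List.map_map]
  have hrow : (fun gp : String × PySem.Dict String Int =>
        [("Графема", gp.1), ("Комбинации", fmtRow gp.2)]) ∘ (fun k => (k, dA.getD k PySem.Dict.empty))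
      = fun g => [("Графема", g), ("Комбинации", fmtRow (innG dB g))] := by
    funext g
    simp only [Function.comp]
    rw [show dA.getD g PySem.Dict.empty = innG dA g from rfl, fmtRow_eq dA dB hS g]
  rw [hrow]
  refine PySem.List.sorted_eq_of_perm_of_pairwise_lt _ _ keyRow ?_ ?_
  · exact (((PySem.List.sorted_perm dB.keys (fun g => g) false).trans
      (keys_perm dA dB hS)).map _)
  · have hle := PySem.List.sorted_pairwise dB.keys (fun g => g)
    have hnd : ((PySem.List.sorted dB.keys (fun g => g) false).map
        (fun g => [("Графема", g), ("Комбинации", fmtRow (innG dB g))])).map keyRow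
        = PySem.List.sorted dB.keys (fun g => g) false := by
      rw [List.map_map]
      have : keyRow ∘ (fun g => [("Графема", g), ("Комбинации", fmtRow (innG dB g))]) = id := by
        funext g; simp [Function.comp, rowkey]
      rw [this, List.map_id]
    refine pairwise_lt_of_le_nodup keyRow _ ?_ ?_
    · rw [List.pairwise_map]
      refine hle.imp ?_
      intro a b hab
      rwa [rowkey, rowkey]
    · rw [hnd]
      exact ((PySem.List.sorted_perm dB.keys (fun g => g) false).nodup_iff).2 hS.2.1.1

def dictA (gd : List (String × List String)) : PySem.Dict String (PySem.Dict String Int) :=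
  (PySem.Dict.ofList gd).items.foldl (fun gc it => glyphCharA' gc it.2) PySem.Dict.empty

def dictB (gd : List (String × List String)) : PySem.Dict String (PySem.Dict String Int) :=
  (PySem.Dict.ofList gd).items.foldl (fun c it => glyphCharB' c it.2) PySem.Dict.empty

theorem A_shape (gd : List (String × List String)) :
    glyph_combinations_analysis gd
      = PySem.List.sorted
          ((dictA gd).items.foldl
            (fun acc gp => acc ++ [[("Графема", gp.1), ("Комбинации", fmtRow gp.2)]])
            ([] : List (List (String × String))))
          keyRow false := rfl

theorem B_shape (gd : List (String × List String)) :
    glyph_combinations_analysis_alt gd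
      = (PySem.List.sorted (dictB gd).keys (fun g => g) false).foldl
          (fun acc g => acc ++ [[("Графема", g), ("Комбинации", fmtRow (innG (dictB gd) g))]])
          ([] : List (List (String × String))) := by
  have hv : (PySem.Dict.ofList gd).values.foldl glyphCharB PySem.Dict.empty = dictB gd := by
    have : (PySem.Dict.ofList gd).values
        = (PySem.Dict.ofList gd).items.map (fun it => it.2) := rfl
    rw [show (PySem.Dict.ofList gd).values.foldl glyphCharB PySem.Dict.empty
        = ((PySem.Dict.ofList gd).items.map (fun it => it.2)).foldl glyphCharB PySem.Dict.empty from rfl,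
      List.foldl_map]
    rfl
  show (PySem.List.sorted ((PySem.Dict.ofList gd).values.foldl glyphCharB PySem.Dict.empty).keys
      (fun g => g) false).foldl
      (fun acc g => acc ++ [[("Графема", g), ("Комбинации",
        fmtRow (((PySem.Dict.ofList gd).values.foldl glyphCharB PySem.Dict.empty).getD g PySem.Dict.empty))]])
      ([] : List (List (String × String)))
    = _
  rw [hv]
  rfl

theorem ports_eq (gd : List (String × List String)) :
    glyph_combinations_analysis gd = glyph_combinations_analysis_alt gd := by
  rw [A_shape, B_shape]
  exact format_eq (dictA gd) (dictB gd) (state_fold (PySem.Dict.ofList gd).items)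

-- ===== VERDICT (by name: the statement is the Claim_ definition above) =====
theorem glyph_combinations_analysis_spec : Claim_equal_glyph_combinations_analysis := by
  intro gd _
  exact ports_eq gd
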